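-- pv_equiv track=rewrite | github.com/BCBT-tust/ZymEvo-RCGB | simple_ligand_optimizer.py | _remove_branches
-- ===== SOURCE A (Python) =====
-- from typing import List, Set, Tuple, Dict, Optional
--
-- def _remove_branches(lines: List[str], remove_ids: Set[int]) -> List[str]:
--     """
--     移除指定的BRANCH（改进版：确保BRANCH/ENDBRANCH完全配对）
--
--     策略：
--     1. 跟踪每个BRANCH的ID
--     2. 遇到要删除的BRANCH时，跳过整个块（包括所有嵌套内容）
--     3. 使用栈确保BRANCH/ENDBRANCH完全配对删除
--     """
--
--     new_lines = []
--     branch_stack = []  # 栈：[(branch_id, should_skip)]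
--     branch_counter = -1
--
--     for line in lines:
--         # 遇到BRANCH
--         if line.startswith('BRANCH'):
--             branch_counter += 1
--
--             # 检查是否应该跳过这个分支
--             should_skip = branch_counter in remove_ids
--
--             # 如果父分支被跳过，子分支也跳过
--             if branch_stack and branch_stack[-1][1]:
--                 should_skip = True
--
--             branch_stack.append((branch_counter, should_skip))
--
--             # 如果不跳过，保留这行
--             if not should_skip:
--                 new_lines.append(line)
--
--             continue
--
--         # 遇到ENDBRANCH
--         elif line.startswith('ENDBRANCH'):
--             if branch_stack:
--                 branch_id, should_skip = branch_stack.pop()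
--
--                 # 只有不跳过的分支才保留ENDBRANCH
--                 if not should_skip:
--                     new_lines.append(line)
--             else:
--                 # 孤立的ENDBRANCH（不应该发生，但保留以防万一）
--                 new_lines.append(line)
--
--             continue
--
--         # TORSDOF行跳过（稍后重新生成）
--         if line.startswith('TORSDOF'):
--             continue
--
--         # 其他行：只有当前不在被跳过的分支内时才保留
--         if not branch_stack or not branch_stack[-1][1]:
--             new_lines.append(line)
--
--     return new_lines
-- ===== SOURCE B (Python) =====
-- def _remove_branches(lines, remove_ids):
--     """Stackless rewrite: track nesting depth and the depth where skipping began."""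
--     out = []
--     depth = 0
--     branch_counter = -1
--     skip_start = None  # depth level of the outermost skipped BRANCH, None if not skipping
--     for line in lines:
--         if line.startswith('BRANCH'):
--             branch_counter += 1
--             skipping = skip_start is not None or branch_counter in remove_ids
--             if skip_start is None and skipping:
--                 skip_start = depth + 1
--             depth += 1
--             if not skipping:
--                 out.append(line)
--         elif line.startswith('ENDBRANCH'):
--             if depth > 0:
--                 if skip_start is None:
--                     out.append(line)
--                 if skip_start == depth:
--                     skip_start = None
--                 depth -= 1
--             else:
--                 out.append(line)  # orphan ENDBRANCH kept
--         elif line.startswith('TORSDOF'):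
--             pass
--         elif skip_start is None:
--             out.append(line)
--     return out
-- ===== Notes on version B (the rewrite author's own statement) =====
-- stated objective: simpler
-- what changed: Replaces the stack of (branch_id, should_skip) pairs with two scalars (nesting depth and the depth at which skipping started), exploiting the invariant that skip flags are monotone down the stack.
import Mathlib
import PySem

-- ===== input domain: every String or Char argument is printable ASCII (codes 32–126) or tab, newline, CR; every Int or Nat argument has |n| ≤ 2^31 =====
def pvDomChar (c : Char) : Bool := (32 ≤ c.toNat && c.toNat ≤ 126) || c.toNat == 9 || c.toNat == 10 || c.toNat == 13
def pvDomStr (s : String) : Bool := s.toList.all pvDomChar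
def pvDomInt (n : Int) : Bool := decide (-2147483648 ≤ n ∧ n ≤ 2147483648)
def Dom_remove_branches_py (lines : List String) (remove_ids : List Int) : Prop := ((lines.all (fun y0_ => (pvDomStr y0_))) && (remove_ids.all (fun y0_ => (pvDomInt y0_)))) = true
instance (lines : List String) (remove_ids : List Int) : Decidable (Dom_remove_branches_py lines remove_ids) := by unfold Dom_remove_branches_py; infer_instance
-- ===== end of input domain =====

-- B replaces A's explicit stack of (branch_id, should_skip) pairs with a depth counter
-- plus the depth at which skipping started (objective: simpler state, same O(n) cost).
-- ===== PORT A =====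
-- A's loop, transliterated as structural recursion over the lines with A's state
-- (stack of (branch_id, should_skip), top at head; branch_counter).
def removeBranchesGoA (remove_ids : List Int) (lines : List String)
    (stack : List (Int × Bool)) (counter : Int) : List String :=
  match lines with
  | [] => []
  | line :: rest =>
    if PySem.Str.startswith line "BRANCH" then
      let counter := counter + 1
      let should_skip := remove_ids.contains counter
      let should_skip := if (stack.headD (0, false)).2 then true else should_skip
      let stack := (counter, should_skip) :: stack
      if should_skip then removeBranchesGoA remove_ids rest stack counter
      else line :: removeBranchesGoA remove_ids rest stack counter
    else if PySem.Str.startswith line "ENDBRANCH" then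
      match stack with
      | (_, should_skip) :: stack' =>
        if should_skip then removeBranchesGoA remove_ids rest stack' counter
        else line :: removeBranchesGoA remove_ids rest stack' counter
      | [] => line :: removeBranchesGoA remove_ids rest [] counter
    else if PySem.Str.startswith line "TORSDOF" then
      removeBranchesGoA remove_ids rest stack counter
    else if (decide (stack = []) || !(stack.headD (0, false)).2) then
      line :: removeBranchesGoA remove_ids rest stack counter
    else
      removeBranchesGoA remove_ids rest stack counter

def remove_branches_py (lines : List String) (remove_ids : List Int) : List String :=
  removeBranchesGoA remove_ids lines [] (-1)

-- ===== PORT B =====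
-- B's loop: depth + skip_start (Option) instead of a stack.
def removeBranchesGoB (remove_ids : List Int) (lines : List String)
    (depth : Int) (counter : Int) (skip_start : Option Int) : List String :=
  match lines with
  | [] => []
  | line :: rest =>
    if PySem.Str.startswith line "BRANCH" then
      let counter := counter + 1
      let skipping := skip_start.isSome || remove_ids.contains counter
      let skip_start := if skip_start.isNone && skipping then some (depth + 1) else skip_start
      if skipping then removeBranchesGoB remove_ids rest (depth + 1) counter skip_start
      else line :: removeBranchesGoB remove_ids rest (depth + 1) counter skip_start
    else if PySem.Str.startswith line "ENDBRANCH" then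
      if depth > 0 then
        let keep := skip_start.isNone
        let skip_start := if skip_start = some depth then none else skip_start
        if keep then line :: removeBranchesGoB remove_ids rest (depth - 1) counter skip_start
        else removeBranchesGoB remove_ids rest (depth - 1) counter skip_start
      else
        line :: removeBranchesGoB remove_ids rest depth counter skip_start
    else if PySem.Str.startswith line "TORSDOF" then
      removeBranchesGoB remove_ids rest depth counter skip_start
    else if skip_start.isNone then
      line :: removeBranchesGoB remove_ids rest depth counter skip_start
    else
      removeBranchesGoB remove_ids rest depth counter skip_start

def remove_branches_py_alt (lines : List String) (remove_ids : List Int) : List String :=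
  removeBranchesGoB remove_ids lines 0 (-1) none

-- ===== PRECONDITION & SPEC =====
def Spec_remove_branches_py (lines : List String) (remove_ids : List Int) (out : List String) : Prop := out = remove_branches_py_alt lines remove_ids
instance (lines : List String) (remove_ids : List Int) (out : List String) : Decidable (Spec_remove_branches_py lines remove_ids out) := by unfold Spec_remove_branches_py; infer_instance

-- ===== CLAIM (what is proved, stated in full; the proofs are below) =====
def Claim_equal_remove_branches_py : Prop := ∀ (lines : List String) (remove_ids : List Int), Dom_remove_branches_py lines remove_ids → Spec_remove_branches_py lines remove_ids (remove_branches_py lines remove_ids)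

-- ===== LEMMAS AND PROOFS =====

-- ===== VERDICT (by name: the statement is the Claim_ definition above) =====
-- Relation between A's stack and B's (depth, skip_start): skip flags are a prefix
-- of trues (top-first) over falses; skip_start records the depth of the lowest true.
def StackRel (s : List (Int × Bool)) (ss : Option Int) : Prop :=
  match ss with
  | none => ∀ x ∈ s, x.2 = false
  | some k => ∃ t f, s = t ++ f ∧ t ≠ [] ∧ (∀ x ∈ t, x.2 = true) ∧ (∀ x ∈ f, x.2 = false)
      ∧ k = (f.length : Int) + 1

theorem topFlag_eq (s : List (Int × Bool)) (ss : Option Int) (hrel : StackRel s ss) :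
    (s.head?.getD (0, false)).2 = ss.isSome := by
  cases ss with
  | none =>
    cases s with
    | nil => rfl
    | cons x s' => simpa using hrel x (by simp)
  | some k =>
    obtain ⟨t, f, hs, ht, htt, _, _⟩ := hrel
    cases t with
    | nil => exact absurd rfl ht
    | cons y t' => subst hs; simpa using htt y (by simp)

theorem go_eq (remove_ids : List Int) (lines : List String) :
    ∀ (s : List (Int × Bool)) (ss : Option Int) (counter : Int), StackRel s ss →
    removeBranchesGoA remove_ids lines s counter
      = removeBranchesGoB remove_ids lines (s.length : Int) counter ss := by
  induction lines with
  | nil => intro s ss counter _; rfl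
  | cons line rest ih =>
    intro s ss counter hrel
    have htop := topFlag_eq s ss hrel
    simp only [removeBranchesGoA, removeBranchesGoB, PySem.Str.startswith_eq, String.reduceToList]
    by_cases hb : PySem.Chars.startswith line.toList ['B', 'R', 'A', 'N', 'C', 'H'] = true
    · -- BRANCH line
      clear htop
      revert hrel
      cases ss with
      | none =>
        intro hrel
        have hflag : (s.head?.getD (0, false)).2 = false := by
          cases s with
          | nil => rfl
          | cons x s' => simpa using hrel x (by simp)
        by_cases hm : (counter + 1) ∈ remove_ids
        · have hrel' : StackRel ((counter + 1, true) :: s) (some ((s.length : Int) + 1)) :=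
            ⟨[(counter + 1, true)], s, by simp, by simp, by simp, hrel, by simp⟩
          have hih := ih ((counter + 1, true) :: s) (some ((s.length : Int) + 1)) (counter + 1) hrel'
          simp only [List.length_cons, Nat.cast_add, Nat.cast_one] at hih
          simp [hb, hflag, hm, hih]
        · have hrel' : StackRel ((counter + 1, false) :: s) none := by
            intro x hx
            rcases List.mem_cons.1 hx with h | h
            · simp [h]
            · exact hrel x h
          have hih := ih ((counter + 1, false) :: s) none (counter + 1) hrel'
          simp only [List.length_cons, Nat.cast_add, Nat.cast_one] at hih
          simp [hb, hflag, hm, hih]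
      | some k =>
        intro hrel
        obtain ⟨t, f, hs, ht, htt, hff, hkk⟩ := hrel
        have hflag : (s.head?.getD (0, false)).2 = true := by
          cases t with
          | nil => exact absurd rfl ht
          | cons y t' => subst hs; simpa using htt y (by simp)
        have hrel' : StackRel ((counter + 1, true) :: s) (some k) :=
          ⟨(counter + 1, true) :: t, f, by rw [hs]; rfl, by simp, by
            intro x hx
            rcases List.mem_cons.1 hx with h | h
            · simp [h]
            · exact htt x h, hff, hkk⟩
        have hih := ih ((counter + 1, true) :: s) (some k) (counter + 1) hrel'
        simp only [List.length_cons, Nat.cast_add, Nat.cast_one] at hih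
        simp [hb, hflag, hih]
    · simp only [hb]
      by_cases he : PySem.Chars.startswith line.toList ['E', 'N', 'D', 'B', 'R', 'A', 'N', 'C', 'H'] = true
      · -- ENDBRANCH line
        clear htop
        revert hrel
        cases s with
        | nil =>
          cases ss with
          | none =>
            intro _
            simp [he, ih [] none counter (by intro x hx; simp at hx)]
          | some k =>
            intro hrel
            obtain ⟨t, f, hs, ht, _, _, _⟩ := hrel
            cases t with
            | nil => exact absurd rfl ht
            | cons y t' => simp at hs
        | cons x s' =>
          have hlen : ((x :: s').length : Int) - 1 = (s'.length : Int) := by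
            simp
          have hpos : (0 : Int) < ((x :: s').length : Int) := by
            simp
          cases ss with
          | none =>
            intro hrel
            have hx2 : x.2 = false := hrel x (by simp)
            have hih := ih s' none counter (fun y hy => hrel y (by simp [hy]))
            simp [he, hx2, hih]
          | some k =>
            intro hrel
            obtain ⟨t, f, hs, ht, htt, hff, hkk⟩ := hrel
            have hx2 : x.2 = true := by
              cases t with
              | nil => exact absurd rfl ht
              | cons y t' =>
                have : x = y := by simpa using congrArg (List.head? · |>.getD x) hs
                rw [this]
                exact htt y (by simp)
            by_cases hone : t.length = 1
            · -- popping the outermost skipped branch: k equals the current depth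
              have hkd : k = (((x :: s').length : Int)) := by
                have hl : (x :: s').length = t.length + f.length := by
                  rw [hs]; simp
                rw [hkk, hl, hone]
                push_cast
                ring
              have hs' : s' = f := by
                cases t with
                | nil => simp at hone
                | cons y t' =>
                  cases t' with
                  | nil => simpa using congrArg List.tail hs
                  | cons z t'' => simp at hone
              have hih := ih s' none counter (by rw [hs']; exact hff)
              simp [he, hx2, hkd, hih]
            · -- an inner skipped branch is popped; skipping continues
              have htpos : 1 ≤ t.length := by
                cases t with
                | nil => exact absurd rfl ht
                | cons _ _ => simp
              have hkd : ¬ (k = (s'.length : Int) + 1) := by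
                have hl : s'.length + 1 = t.length + f.length := by
                  simpa using congrArg List.length hs
                rw [hkk]
                intro hcontra
                omega
              have hs' : s' = t.tail ++ f := by
                cases t with
                | nil => exact absurd rfl ht
                | cons y t' => simpa using congrArg List.tail hs
              have hrel' : StackRel s' (some k) := by
                refine ⟨t.tail, f, hs', ?_, fun y hy => htt y (List.mem_of_mem_tail hy), hff, hkk⟩
                cases t with
                | nil => exact absurd rfl ht
                | cons y t' =>
                  cases t' with
                  | nil => simp at hone
                  | cons z t'' => simp
              have hih := ih s' (some k) counter hrel'
              simp [he, hx2, hkd, hih]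
      · simp only [he]
        by_cases htd : PySem.Chars.startswith line.toList ['T', 'O', 'R', 'S', 'D', 'O', 'F'] = true
        · simp [htd, ih s ss counter hrel]
        · have hiff : (s = [] ∨ (s.head?.getD (0, false)).2 = false) ↔ ss = none := by
            constructor
            · intro h
              cases hss : ss with
              | none => rfl
              | some k =>
                rw [hss] at hrel htop
                obtain ⟨t, f, hs, ht, _, _, _⟩ := hrel
                rcases h with h | h
                · cases t with
                  | nil => exact absurd rfl ht
                  | cons y t' => rw [h] at hs; simp at hs
                · rw [htop] at h; simp at h
            · intro h
              right
              rw [h] at htop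
              simpa using htop
          simp [htd, hiff, ih s ss counter hrel]

theorem remove_branches_py_spec : Claim_equal_remove_branches_py := by
  intro lines remove_ids _
  unfold Spec_remove_branches_py remove_branches_py remove_branches_py_alt
  exact go_eq remove_ids lines [] none (-1) (by intro x hx; simp at hx)
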